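-- pv_equiv track=rewrite | github.com/alexandraback/datacollection | solutions_5738606668808192_1/Python/vexorian/C.py | is_divisor
-- ===== SOURCE A (Python) =====
-- def is_divisor(coin, b, d):
--     m = 0
--     p = 1
--     for x in reversed(coin):
--         if x == 1:
--             m = (m + p) % d
--         p = (p * b) % d
--     if m == 0:
--         return True
--     else:
--         return False
-- ===== SOURCE B (Python) =====
-- def is_divisor(coin, b, d):
--     m = 0
--     for x in coin:
--         m = (m * b) % d
--         if x == 1:
--             m = (m + 1) % d
--     return m == 0
-- ===== Notes on version B (the rewrite author's own statement) =====
-- stated objective: simpler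
-- what changed: Replaced the reversed-order loop carrying a remainder plus a running power p with a left-to-right Horner scan keeping a single running remainder; the power variable disappears.
import Mathlib
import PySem

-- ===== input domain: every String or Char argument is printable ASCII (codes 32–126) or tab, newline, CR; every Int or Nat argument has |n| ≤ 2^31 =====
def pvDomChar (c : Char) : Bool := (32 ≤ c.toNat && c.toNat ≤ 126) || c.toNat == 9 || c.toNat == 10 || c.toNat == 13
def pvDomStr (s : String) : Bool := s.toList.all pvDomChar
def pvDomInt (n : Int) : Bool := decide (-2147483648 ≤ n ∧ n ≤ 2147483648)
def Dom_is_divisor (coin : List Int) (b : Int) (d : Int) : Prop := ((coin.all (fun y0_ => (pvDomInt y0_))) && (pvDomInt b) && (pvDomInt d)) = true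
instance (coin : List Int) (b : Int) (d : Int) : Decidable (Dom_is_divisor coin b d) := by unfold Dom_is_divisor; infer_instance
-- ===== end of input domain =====

-- B replaces A's reversed-order loop with remainder + running power by a left-to-right
-- Horner scan with a single running remainder (objective: simpler).

-- ===== PORT A =====
def is_divisor (coin : List Int) (b : Int) (d : Int) : Bool :=
  let s := coin.reverse.foldl
    (fun (mp : Int × Int) x =>
      let m := if x == 1 then PySem.Int.mod (mp.1 + mp.2) d else mp.1
      (m, PySem.Int.mod (mp.2 * b) d))
    (0, 1)
  if s.1 == 0 then true else false

-- ===== PORT B =====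
def is_divisor_alt (coin : List Int) (b : Int) (d : Int) : Bool :=
  let m := coin.foldl
    (fun m x =>
      let m1 := PySem.Int.mod (m * b) d
      if x == 1 then PySem.Int.mod (m1 + 1) d else m1)
    0
  m == 0

-- ===== PRECONDITION & SPEC =====
-- Python's '%' raises ZeroDivisionError when d = 0 and the loop body runs (coin nonempty).
def Pre_is_divisor (coin : List Int) (b : Int) (d : Int) : Prop := coin = [] ∨ d ≠ 0
instance (coin : List Int) (b : Int) (d : Int) : Decidable (Pre_is_divisor coin b d) := by unfold Pre_is_divisor; infer_instance
def pvWitness_is_divisor : List Int × Int × Int := ([1, 0, 1], 2, 5)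
def Spec_is_divisor (coin : List Int) (b : Int) (d : Int) (out : Bool) : Prop := out = is_divisor_alt coin b d
instance (coin : List Int) (b : Int) (d : Int) (out : Bool) : Decidable (Spec_is_divisor coin b d out) := by unfold Spec_is_divisor; infer_instance

-- ===== CLAIM (what is proved, stated in full; the proofs are below) =====
def Claim_equal_is_divisor : Prop := ∀ (coin : List Int) (b : Int) (d : Int), Dom_is_divisor coin b d → Pre_is_divisor coin b d → Spec_is_divisor coin b d (is_divisor coin b d)

-- ===== LEMMAS AND PROOFS =====

-- digit value (1 for digit 1, else 0) and exact Horner value, no reduction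
def pvDval (x : Int) : Int := if x == 1 then 1 else 0
def pvHval (b : Int) (s : Int) (l : List Int) : Int :=
  l.foldl (fun v x => v * b + pvDval x) s

theorem pvHval_shift (b : Int) (l : List Int) (s : Int) :
    pvHval b s l = s * b ^ l.length + pvHval b 0 l := by
  induction l generalizing s with
  | nil => simp [pvHval]
  | cons x t ih =>
    simp only [pvHval, List.foldl_cons, List.length_cons] at *
    rw [ih (s * b + pvDval x), ih (0 * b + pvDval x)]
    ring

-- Python floored mod depends only on the residue class (d ≠ 0)
theorem pv_mod_congr (a a' d : Int) (hd : d ≠ 0) (h : d ∣ (a - a')) :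
    PySem.Int.mod a d = PySem.Int.mod a' d := by
  have h1 := PySem.Int.floordiv_mul_add_mod a d
  have h2 := PySem.Int.floordiv_mul_add_mod a' d
  have hdvd : d ∣ (PySem.Int.mod a d - PySem.Int.mod a' d) := by
    have : PySem.Int.mod a d - PySem.Int.mod a' d
        = (a - a') - (PySem.Int.floordiv a d - PySem.Int.floordiv a' d) * d := by
      linarith [h1, h2]
    rw [this]
    exact dvd_sub h (Dvd.intro_left _ rfl)
  have hz : PySem.Int.mod a d - PySem.Int.mod a' d = 0 := by
    apply Int.eq_zero_of_dvd_of_natAbs_lt_natAbs hdvd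
    rcases lt_or_gt_of_ne hd with hneg | hpos
    · have b1 := PySem.Int.mod_neg_bounds a hneg
      have b2 := PySem.Int.mod_neg_bounds a' hneg
      omega
    · have b1 := PySem.Int.mod_nonneg a hpos
      have b2 := PySem.Int.mod_lt a hpos
      have b3 := PySem.Int.mod_nonneg a' hpos
      have b4 := PySem.Int.mod_lt a' hpos
      omega
  omega

theorem pv_dvd_sub_mod (a d : Int) : d ∣ (a - PySem.Int.mod a d) := by
  have h := PySem.Int.floordiv_mul_add_mod a d
  exact ⟨PySem.Int.floordiv a d, by linarith⟩

theorem pv_mod_add_left (a c d : Int) (hd : d ≠ 0) :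
    PySem.Int.mod (PySem.Int.mod a d + c) d = PySem.Int.mod (a + c) d := by
  apply pv_mod_congr _ _ _ hd
  have := pv_dvd_sub_mod a d
  have h : (PySem.Int.mod a d + c) - (a + c) = -(a - PySem.Int.mod a d) := by ring
  rw [h]; exact dvd_neg.mpr this

theorem pv_mod_add_right (a c d : Int) (hd : d ≠ 0) :
    PySem.Int.mod (c + PySem.Int.mod a d) d = PySem.Int.mod (c + a) d := by
  rw [add_comm c, add_comm c]; exact pv_mod_add_left a c d hd

theorem pv_mod_mul_left (a c d : Int) (hd : d ≠ 0) :
    PySem.Int.mod (PySem.Int.mod a d * c) d = PySem.Int.mod (a * c) d := by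
  apply pv_mod_congr _ _ _ hd
  have h : PySem.Int.mod a d * c - a * c = -((a - PySem.Int.mod a d) * c) := by ring
  rw [h]
  exact dvd_neg.mpr (Dvd.dvd.mul_right (pv_dvd_sub_mod a d) c)

theorem pv_mod_zero (d : Int) : PySem.Int.mod 0 d = 0 :=
  (PySem.Int.mod_eq_zero_iff_dvd 0 d).mpr (dvd_zero d)

-- d divides the hval difference if it divides the seed difference
theorem pv_hval_congr (b d : Int) (l : List Int) (s s' : Int) (h : d ∣ (s - s')) :
    d ∣ (pvHval b s l - pvHval b s' l) := by
  induction l generalizing s s' with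
  | nil => simpa [pvHval] using h
  | cons x t ih =>
    simp only [pvHval, List.foldl_cons]
    apply ih
    have : (s * b + pvDval x) - (s' * b + pvDval x) = (s - s') * b := by ring
    rw [this]
    exact Dvd.dvd.mul_right h b

-- A's loop characterisation on a nonempty list
theorem pv_foldA (b d : Int) (hd : d ≠ 0) (x : Int) (t : List Int) :
    ((x :: t).reverse.foldl
      (fun (mp : Int × Int) y =>
        let m := if y == 1 then PySem.Int.mod (mp.1 + mp.2) d else mp.1
        (m, PySem.Int.mod (mp.2 * b) d))
      (0, 1))
    = (PySem.Int.mod (pvHval b 0 (x :: t)) d, PySem.Int.mod (b ^ (x :: t).length) d) := by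
  induction t generalizing x with
  | nil =>
    simp only [List.reverse_cons, List.reverse_nil, List.nil_append, List.foldl_cons,
      List.foldl_nil, List.length_cons, List.length_nil, pvHval, pvDval]
    by_cases hx : x = 1
    · simp [hx]
    · simp [hx, pv_mod_zero]
  | cons y t ih =>
    have hrev : (x :: y :: t).reverse = (y :: t).reverse ++ [x] := by
      simp
    rw [hrev, List.foldl_append, ih y]
    simp only [List.foldl_cons, List.foldl_nil, List.length_cons]
    have hh : pvHval b 0 (x :: y :: t)
        = pvHval b 0 (y :: t) + pvDval x * b ^ (y :: t).length := by
      have h1 : pvHval b 0 (x :: y :: t) = pvHval b (0 * b + pvDval x) (y :: t) := by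
        simp [pvHval]
      rw [h1, pvHval_shift]
      simp [List.length_cons]; ring
    simp only [Prod.mk.injEq]
    constructor
    · by_cases hx : x = 1
      · subst hx
        simp only [beq_self_eq_true, if_true]
        rw [pv_mod_add_right _ _ _ hd, pv_mod_add_left _ _ _ hd, hh]
        simp [pvDval, List.length_cons]
      · have hx' : (x == 1) = false := by simp [hx]
        rw [hx', if_neg (by simp)]
        rw [hh]
        simp [pvDval, hx]
    · rw [pv_mod_mul_left _ _ _ hd]
      congr 1
      exact (pow_succ b (t.length + 1)).symm

-- B's loop characterisation on a nonempty list
theorem pv_foldB (b d : Int) (hd : d ≠ 0) (l : List Int) (hl : l ≠ []) (s : Int) :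
    (l.foldl
      (fun m x =>
        let m1 := PySem.Int.mod (m * b) d
        if x == 1 then PySem.Int.mod (m1 + 1) d else m1)
      s)
    = PySem.Int.mod (pvHval b s l) d := by
  induction l generalizing s with
  | nil => exact absurd rfl hl
  | cons x t ih =>
    simp only [List.foldl_cons]
    have hstep : (let m1 := PySem.Int.mod (s * b) d
        if x == 1 then PySem.Int.mod (m1 + 1) d else m1)
        = PySem.Int.mod (s * b + pvDval x) d := by
      by_cases hx : x = 1
      · simp only [hx, beq_self_eq_true, if_true, pvDval]
        rw [pv_mod_add_left _ _ _ hd]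
      · simp [pvDval, hx]
    rw [hstep]
    by_cases ht : t = []
    · simp [ht, pvHval]
    · rw [ih ht]
      show PySem.Int.mod (pvHval b (PySem.Int.mod (s * b + pvDval x) d) t) d
          = PySem.Int.mod (pvHval b (s * b + pvDval x) t) d
      apply pv_mod_congr _ _ _ hd
      apply pv_hval_congr b d t
      have h := pv_dvd_sub_mod (s * b + pvDval x) d
      have he : PySem.Int.mod (s * b + pvDval x) d - (s * b + pvDval x)
          = -((s * b + pvDval x) - PySem.Int.mod (s * b + pvDval x) d) := by ring
      rw [he]
      exact dvd_neg.mpr h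

-- ===== VERDICT (by name: the statement is the Claim_ definition above) =====
theorem is_divisor_spec : Claim_equal_is_divisor := by
  intro coin b d _ hpre
  unfold Spec_is_divisor is_divisor is_divisor_alt
  cases coin with
  | nil => simp
  | cons x t =>
    have hd : d ≠ 0 := by
      rcases hpre with h | h
      · exact absurd h (by simp)
      · exact h
    rw [pv_foldA b d hd x t, pv_foldB b d hd (x :: t) (by simp) 0]
    by_cases h : PySem.Int.mod (pvHval b 0 (x :: t)) d = 0 <;> simp [h]
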